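-- pv_equiv track=rewrite | github.com/shlim1392/Coding_p | Python/백준/Silver/1003. 피보나치 함수/피보나치 함수.py | fibonacci_counts
-- ===== SOURCE A (Python) =====
-- def fibonacci_counts(n):
--     dp_zeros = [0] * (n + 1)
--     dp_ones = [0] * (n + 1)
--
--     dp_zeros[0] = 1
--     dp_ones[0] = 0
--
--     if n > 0:
--         dp_zeros[1] = 0
--         dp_ones[1] = 1
--
--     for i in range(2, n + 1):
--         dp_zeros[i] = dp_zeros[i - 1] + dp_zeros[i - 2]
--         dp_ones[i] = dp_ones[i - 1] + dp_ones[i - 2]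
--
--     return dp_zeros[n], dp_ones[n]
-- ===== SOURCE B (Python) =====
-- def fibonacci_counts(n):
--     # Fast doubling: fd(k) returns (F(k), F(k+1)); zeros = F(n+1) - F(n), ones = F(n).
--     def fd(k):
--         if k == 0:
--             return (0, 1)
--         a, b = fd(k // 2)
--         c = a * (2 * b - a)
--         d = a * a + b * b
--         if k % 2:
--             return (d, c + d)
--         return (c, d)
--     a, b = fd(n)
--     return b - a, a
-- ===== Notes on version B (the rewrite author's own statement) =====
-- stated objective: faster
-- what changed: Replaces the O(n) DP-array loop with fast-doubling Fibonacci recursion (zeros = F(n+1)-F(n), ones = F(n)) in O(log n) arithmetic steps.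
import Mathlib
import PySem

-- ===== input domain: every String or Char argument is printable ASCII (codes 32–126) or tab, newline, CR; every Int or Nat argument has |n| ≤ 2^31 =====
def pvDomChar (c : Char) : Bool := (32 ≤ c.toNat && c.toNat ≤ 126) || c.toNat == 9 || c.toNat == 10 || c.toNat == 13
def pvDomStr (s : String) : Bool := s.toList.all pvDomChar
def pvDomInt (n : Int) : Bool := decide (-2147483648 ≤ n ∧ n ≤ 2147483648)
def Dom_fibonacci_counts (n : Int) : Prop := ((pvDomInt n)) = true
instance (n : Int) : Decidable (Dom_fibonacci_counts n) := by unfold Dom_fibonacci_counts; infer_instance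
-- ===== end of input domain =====

-- B replaces A's O(n) DP-array loop by fast-doubling Fibonacci recursion (O(log n) steps); equivalence of the return values is proved for n ≥ 0.

-- ===== PORT A =====
-- one step of A's 'for i in range(2, n+1)' loop: dp[i] = dp[i-1] + dp[i-2] on both arrays
def stepA (p : List Int × List Int) (i : Int) : List Int × List Int :=
  (p.1.set i.toNat (p.1.getD (i.toNat - 1) 0 + p.1.getD (i.toNat - 2) 0),
   p.2.set i.toNat (p.2.getD (i.toNat - 1) 0 + p.2.getD (i.toNat - 2) 0))

-- the dp arrays after the initial assignments (dp[0], and dp[1] when n > 0)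
def initA (n : Int) : List Int × List Int :=
  let dpZ := (List.replicate ((n + 1).toNat) (0 : Int)).set 0 1
  let dpO := (List.replicate ((n + 1).toNat) (0 : Int)).set 0 0
  if n > 0 then (dpZ.set 1 0, dpO.set 1 1) else (dpZ, dpO)

def fibonacci_counts (n : Int) : Int × Int :=
  let s := (PySem.List.pyRange 2 (n + 1) 1).foldl stepA (initA n)
  (s.1.getD n.toNat 0, s.2.getD n.toNat 0)

-- ===== PORT B =====
-- fast doubling: fdAlt k = (F(k), F(k+1)); B's fd is called only with k ≥ 0
def fdAlt : Nat → Int × Int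
  | 0 => (0, 1)
  | (k + 1) =>
    let p := fdAlt ((k + 1) / 2)
    let a := p.1
    let b := p.2
    let c := a * (2 * b - a)
    let d := a * a + b * b
    if (k + 1) % 2 = 1 then (d, c + d) else (c, d)
decreasing_by exact Nat.div_lt_self (Nat.succ_pos k) (by norm_num)

def fibonacci_counts_alt (n : Int) : Int × Int :=
  let p := fdAlt n.toNat
  (p.2 - p.1, p.1)

-- ===== PRECONDITION & SPEC =====
-- Pre_ excludes negative n, where Python A raises IndexError (the first dp assignment hits an empty list)
-- and Python B's recursion does not terminate (RecursionError).
def Pre_fibonacci_counts (n : Int) : Prop := 0 ≤ n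
instance (n : Int) : Decidable (Pre_fibonacci_counts n) := by unfold Pre_fibonacci_counts; infer_instance
def pvWitness_fibonacci_counts : Int := (7)

def Spec_fibonacci_counts (n : Int) (out : Int × Int) : Prop := out = fibonacci_counts_alt n
instance (n : Int) (out : Int × Int) : Decidable (Spec_fibonacci_counts n out) := by unfold Spec_fibonacci_counts; infer_instance

-- ===== CLAIM (what is proved, stated in full; the proofs are below) =====
def Claim_equal_fibonacci_counts : Prop := ∀ (n : Int), Dom_fibonacci_counts n → Pre_fibonacci_counts n → Spec_fibonacci_counts n (fibonacci_counts n)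

-- ===== LEMMAS AND PROOFS =====

-- abstract values: zF k = #zero-calls of fib(k) = F(k+1) - F(k); oF k = #one-calls = F(k)
def zF (k : Nat) : Int := (Nat.fib (k + 1) : Int) - Nat.fib k
def oF (k : Nat) : Int := (Nat.fib k : Int)

lemma fdAlt_eq : ∀ k : Nat, fdAlt k = ((Nat.fib k : Int), (Nat.fib (k + 1) : Int)) := by
  intro k
  induction k using Nat.strong_induction_on with
  | _ k ih =>
    match k with
    | 0 => simp [fdAlt]
    | (k + 1) =>
      rw [fdAlt]
      have hlt : (k + 1) / 2 < k + 1 := Nat.div_lt_self (Nat.succ_pos k) (by norm_num)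
      rw [ih _ hlt]
      set m := (k + 1) / 2 with hm
      have hfle : Nat.fib m ≤ 2 * Nat.fib (m + 1) :=
        le_trans (Nat.fib_le_fib_succ) (by omega)
      have hc : ((Nat.fib (2 * m) : Nat) : Int)
          = (Nat.fib m : Int) * (2 * (Nat.fib (m + 1) : Int) - (Nat.fib m : Int)) := by
        rw [Nat.fib_two_mul]
        push_cast [Nat.cast_sub hfle]
        ring
      have hd : ((Nat.fib (2 * m + 1) : Nat) : Int)
          = (Nat.fib m : Int) * (Nat.fib m : Int) + (Nat.fib (m + 1) : Int) * (Nat.fib (m + 1) : Int) := by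
        rw [Nat.fib_two_mul_add_one]
        push_cast
        ring
      rcases Nat.even_or_odd (k + 1) with he | ho
      · obtain ⟨t, ht⟩ := he
        have hmt : m = t := by omega
        have hmod : (k + 1) % 2 = 0 := by omega
        simp only [hmod]
        norm_num
        subst hmt
        constructor
        · rw [show k + 1 = 2 * m by omega]; rw [← hc]
        · rw [show k + 1 + 1 = 2 * m + 1 by omega]; rw [← hd]
      · obtain ⟨t, ht⟩ := ho
        have hmt : m = t := by omega
        have hmod : (k + 1) % 2 = 1 := by omega
        simp only [hmod]
        norm_num
        subst hmt
        have h2 : ((Nat.fib (2 * m + 2) : Nat) : Int)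
            = ((Nat.fib (2 * m) : Nat) : Int) + ((Nat.fib (2 * m + 1) : Nat) : Int) := by
          rw [show 2 * m + 2 = (2 * m) + 2 by rfl, Nat.fib_add_two]; push_cast; ring
        constructor
        · rw [show k + 1 = 2 * m + 1 by omega]; rw [← hd]
        · rw [show k + 1 + 1 = 2 * m + 2 by omega, h2, hc, hd]

-- loop invariant for A's dp arrays: lengths stay n+1 and the last two entries are zF/oF
lemma invA (n : Int) (hn : 1 ≤ n) :
    ∀ m : Nat, 1 ≤ m → (m : Int) ≤ n →
    let s := (PySem.List.pyRange 2 ((m : Int) + 1) 1).foldl stepA (initA n)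
    s.1.length = (n + 1).toNat ∧ s.2.length = (n + 1).toNat ∧
    s.1.getD (m - 1) 0 = zF (m - 1) ∧ s.1.getD m 0 = zF m ∧
    s.2.getD (m - 1) 0 = oF (m - 1) ∧ s.2.getD m 0 = oF m := by
  intro m
  induction m with
  | zero => intro h; omega
  | succ m ihm =>
    intro _ hle
    by_cases hm1 : m = 0
    · -- base case m+1 = 1: empty range, initial arrays
      subst hm1
      have hr : PySem.List.pyRange 2 ((1 : Int) + 1) 1 = [] := PySem.List.pyRange_one_eq_nil (by norm_num)
      rw [Nat.cast_one, hr]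
      simp only [List.foldl_nil]
      have hnpos : n > 0 := by omega
      have hlen : 2 ≤ (n + 1).toNat := by omega
      simp only [initA, if_pos hnpos]
      refine ⟨by simp, by simp, ?_, ?_, ?_, ?_⟩ <;>
        simp [List.getD, zF, oF, show 0 < (n+1).toNat by omega, show 1 < (n+1).toNat by omega]
    · -- step: peel the last index m+1 off the range
      have hm : 1 ≤ m := by omega
      have hrec := ihm hm (by push_cast at hle ⊢; omega)
      have hsplit : PySem.List.pyRange 2 ((↑(m + 1) : Int) + 1) 1
          = PySem.List.pyRange 2 ((m : Int) + 1) 1 ++ [(m : Int) + 1] := by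
        have := PySem.List.pyRange_one_succ_right (a := 2) (b := (m : Int) + 1) (by omega)
        push_cast at this ⊢
        rw [this]
      rw [hsplit, List.foldl_append]
      set s := (PySem.List.pyRange 2 ((m : Int) + 1) 1).foldl stepA (initA n) with hs
      obtain ⟨hl1, hl2, hz1, hz2, ho1, ho2⟩ := hrec
      simp only [List.foldl_cons, List.foldl_nil]
      have htn : ((m : Int) + 1).toNat = m + 1 := by omega
      have hidx : m + 1 < (n + 1).toNat := by omega
      constructor
      · simp [stepA, hl1]
      constructor
      · simp [stepA, hl2]
      have hgd : ∀ (l : List Int) (j v : _), j ≠ m + 1 → (l.set (m+1) v).getD j 0 = l.getD j 0 := by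
        intro l j v hj
        simp [List.getD, List.getElem?_set_ne (by omega : m + 1 ≠ j)]
      have hgdE : ∀ (l : List Int) (v : Int), l.length = (n+1).toNat → (l.set (m+1) v).getD (m+1) 0 = v := by
        intro l v hlv
        simp [List.getD, List.getElem?_set_self (by omega : m + 1 < l.length)]
      have e1 : m - 1 + 2 = m + 1 := by omega
      have e2 : m - 1 + 1 = m := by omega
      have knat : Nat.fib (m + 1) = Nat.fib (m - 1) + Nat.fib m := by
        have := Nat.fib_add_two (n := m - 1)
        rw [e1, e2] at this
        omega
      clear e1
      have knat2 : Nat.fib (m + 2) = Nat.fib m + Nat.fib (m + 1) := Nat.fib_add_two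
      have hfz : zF m + zF (m - 1) = zF (m + 1) := by
        simp only [zF, show m - 1 + 1 = m from e2, show m + 1 + 1 = m + 2 from rfl]
        omega
      have hfo : oF m + oF (m - 1) = oF (m + 1) := by
        simp only [oF]
        omega
      refine ⟨?_, ?_, ?_, ?_⟩
      · simp only [stepA, htn, show m + 1 - 1 = m from rfl]
        rw [hgd _ m _ (by omega)]
        exact hz2
      · simp only [stepA, htn]
        rw [hgdE _ _ hl1]
        rw [show m + 1 - 1 = m from rfl, show m + 1 - 2 = m - 1 by omega]
        rw [hz1, hz2, hfz]
      · simp only [stepA, htn, show m + 1 - 1 = m from rfl]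
        rw [hgd _ m _ (by omega)]
        exact ho2
      · simp only [stepA, htn]
        rw [hgdE _ _ hl2]
        rw [show m + 1 - 1 = m from rfl, show m + 1 - 2 = m - 1 by omega]
        rw [ho1, ho2, hfo]

-- ===== VERDICT (by name: the statement is the Claim_ definition above) =====
theorem fibonacci_counts_spec : Claim_equal_fibonacci_counts := by
  intro n _ hpre
  unfold Spec_fibonacci_counts
  have hb : fibonacci_counts_alt n = (zF n.toNat, oF n.toNat) := by
    simp only [fibonacci_counts_alt, fdAlt_eq, zF, oF]
  rw [hb]
  by_cases h0 : n = 0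
  · subst h0; decide
  · have hn : 1 ≤ n := by unfold Pre_fibonacci_counts at hpre; omega
    have hN : ((n.toNat : Int)) = n := by omega
    have := invA n hn n.toNat (by omega) (by omega)
    simp only at this
    obtain ⟨_, _, _, hz, _, ho⟩ := this
    simp only [fibonacci_counts]
    rw [show (n : Int) + 1 = (n.toNat : Int) + 1 by omega]
    rw [Prod.ext_iff]
    exact ⟨hz, ho⟩
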